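-- pv_equiv track=rewrite | github.com/idongessien/cs-sprint-challenge-hash-tables | hashtables/ex4/ex4.py | has_negatives
-- ===== SOURCE A (Python) =====
-- def has_negatives(a):
--     """
--     YOUR CODE HERE
--     """
--     # Your code here
--
--     nums_with_opposite = dict()
--     corresponding_pair_absolutes = []
--
--     for num in a:
--
--         '''first add nums to dict . 0 has no opposite'''
--         nums_with_opposite[num] = 1
--
--         '''Add absolute value to new arr if opposite exists'''
--         if -num in nums_with_opposite and num != 0:
--             corresponding_pair_absolutes.append(abs(num))
--
--     return corresponding_pair_absolutes
-- ===== SOURCE B (Python) =====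
-- def has_negatives(a):
--     first_idx = {}
--     for i, num in enumerate(a):
--         if num not in first_idx:
--             first_idx[num] = i
--     result = []
--     for i, num in enumerate(a):
--         if num != 0 and -num in first_idx and first_idx[-num] < i:
--             result.append(abs(num))
--     return result
-- ===== Notes on version B (the rewrite author's own statement) =====
-- stated objective: alternative
-- what changed: Replaces the single streaming seen-so-far dict pass with two passes: first build a first-occurrence-index map, then emit abs(num) when -num's first occurrence precedes the current position.
import Mathlib
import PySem

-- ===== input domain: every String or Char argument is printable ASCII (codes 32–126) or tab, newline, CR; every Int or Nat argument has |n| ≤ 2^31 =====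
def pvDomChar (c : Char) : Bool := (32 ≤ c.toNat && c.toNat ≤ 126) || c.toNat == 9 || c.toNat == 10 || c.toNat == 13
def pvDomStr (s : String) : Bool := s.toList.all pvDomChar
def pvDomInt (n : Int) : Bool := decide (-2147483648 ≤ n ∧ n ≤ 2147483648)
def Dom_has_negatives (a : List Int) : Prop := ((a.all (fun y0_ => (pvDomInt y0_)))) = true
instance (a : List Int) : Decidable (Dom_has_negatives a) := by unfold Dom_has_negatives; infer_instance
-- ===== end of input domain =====

-- B replaces A's single streaming seen-so-far pass by two passes (build a first-occurrence-index map,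
-- then compare first-occurrence indices); alternative decomposition, same cost.

-- ===== PORT A =====
-- one pass: insert each num into the dict, then append abs(num) if -num is already a key (and num ≠ 0)
def has_negatives (a : List Int) : List Int :=
  (a.foldl
    (fun (st : PySem.Dict Int Int × List Int) num =>
      let d := st.1.insert num 1
      (d, if d.contains (-num) = true ∧ num ≠ 0 then st.2 ++ [|num|] else st.2))
    (PySem.Dict.empty, [])).2

-- ===== PORT B =====
-- two passes: first build the first-occurrence-index map, then emit abs(num) whenever the first
-- occurrence of -num is strictly before the current position
def has_negatives_alt (a : List Int) : List Int :=
  let fidx := (PySem.List.enumerate a).foldl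
    (fun (d : PySem.Dict Int Int) p => if d.contains p.2 = true then d else d.insert p.2 p.1)
    PySem.Dict.empty
  (PySem.List.enumerate a).foldl
    (fun (res : List Int) p =>
      if p.2 ≠ 0 ∧ fidx.contains (-p.2) = true ∧ fidx.getD (-p.2) 0 < p.1 then res ++ [|p.2|]
      else res)
    []

-- ===== PRECONDITION & SPEC =====
def Spec_has_negatives (a : List Int) (out : List Int) : Prop := out = has_negatives_alt a
instance (a : List Int) (out : List Int) : Decidable (Spec_has_negatives a out) := by unfold Spec_has_negatives; infer_instance

-- ===== CLAIM (what is proved, stated in full; the proofs are below) =====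
def Claim_equal_has_negatives : Prop := ∀ (a : List Int), Dom_has_negatives a → Spec_has_negatives a (has_negatives a)

-- ===== LEMMAS AND PROOFS =====

-- canonical form: emit |n| at each position whose negation already occurred in the prefix `seen`
def specGo : List Int → List Int → List Int
  | _, [] => []
  | seen, n :: rest => (if n ≠ 0 ∧ -n ∈ seen then [|n|] else []) ++ specGo (seen ++ [n]) rest

lemma a_fold (l : List Int) : ∀ (seen : List Int) (d : PySem.Dict Int Int) (acc : List Int),
    (∀ v, d.contains v = decide (v ∈ seen)) →
    (l.foldl
      (fun (st : PySem.Dict Int Int × List Int) num =>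
        let d := st.1.insert num 1
        (d, if d.contains (-num) = true ∧ num ≠ 0 then st.2 ++ [|num|] else st.2))
      (d, acc)).2 = acc ++ specGo seen l := by
  induction l with
  | nil => intro seen d acc _; simp [specGo]
  | cons n rest ih =>
      intro seen d acc hd
      simp only [List.foldl_cons]
      have hc : ∀ v, (d.insert n 1).contains v = decide (v ∈ seen ++ [n]) := by
        intro v
        rw [PySem.Dict.contains_insert, hd]
        by_cases hv : v = n <;> simp [hv]
      rw [ih (seen ++ [n]) _ _ hc]
      have hcond : ((d.insert n 1).contains (-n) = true ∧ n ≠ 0) ↔ (n ≠ 0 ∧ -n ∈ seen) := by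
        rw [hc]
        constructor
        · rintro ⟨hmem, hn0⟩
          refine ⟨hn0, ?_⟩
          simp only [decide_eq_true_eq, List.mem_append, List.mem_singleton] at hmem
          rcases hmem with h | h
          · exact h
          · exact absurd (by omega : n = 0) hn0
        · rintro ⟨hn0, hmem⟩
          exact ⟨by simp [hmem], hn0⟩
      by_cases h : n ≠ 0 ∧ -n ∈ seen
      · rw [if_pos (hcond.mpr h)]
        simp [specGo, h]
      · rw [if_neg (fun hh => h (hcond.mp hh))]
        simp [specGo, h]

-- the first pass of B computes the first-occurrence index of every element
lemma fidx_get (l : List Int) : ∀ (s : Int) (d : PySem.Dict Int Int) (v : Int),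
    ((PySem.List.enumerate l s).foldl
      (fun (d : PySem.Dict Int Int) p => if d.contains p.2 = true then d else d.insert p.2 p.1)
      d).get? v
    = ((d.get? v).orElse (fun _ => if v ∈ l then some (s + (l.idxOf v : Int)) else none)) := by
  induction l with
  | nil =>
      intro s d v
      cases h : d.get? v <;> simp [PySem.List.enumerate_nil, Option.orElse, h]
  | cons x xs ih =>
      intro s d v
      rw [PySem.List.enumerate_cons, List.foldl_cons]
      by_cases hx : d.contains x = true
      · rw [if_pos hx, ih]
        cases hdv : d.get? v with
        | some j => simp [Option.orElse]
        | none =>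
            have hvx : v ≠ x := by
              intro h; subst h
              rw [PySem.Dict.contains_eq_isSome_get?, hdv] at hx; simp at hx
            simp only [Option.orElse]
            by_cases hm : v ∈ xs
            · rw [List.idxOf_cons_ne _ (Ne.symm hvx)]
              simp [hm, hvx]
              ring
            · simp [hm, hvx]
      · rw [if_neg hx, ih]
        by_cases hvx : v = x
        · subst hvx
          have hdv : d.get? v = none := by
            rw [PySem.Dict.contains_eq_isSome_get?] at hx
            cases h : d.get? v <;> simp [h] at hx ⊢
          rw [PySem.Dict.get?_insert_self]
          simp [Option.orElse, hdv, List.idxOf_cons_self]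
        · rw [PySem.Dict.get?_insert_of_ne _ _ hvx]
          cases hdv : d.get? v with
          | some j => simp [Option.orElse]
          | none =>
              simp only [Option.orElse]
              by_cases hm : v ∈ xs
              · rw [List.idxOf_cons_ne _ (Ne.symm hvx)]
                simp [hm, hvx]
                ring
              · simp [hm, hvx]

lemma mem_take_iff_idxOf_lt (a : List Int) : ∀ (k : Nat) (v : Int),
    v ∈ a.take k ↔ (v ∈ a ∧ a.idxOf v < k) := by
  induction a with
  | nil => intro k v; simp
  | cons x xs ih =>
      intro k v
      cases k with
      | zero => simp
      | succ k =>
          by_cases hvx : v = x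
          · subst hvx; simp [List.idxOf_cons_self]
          · rw [List.take_succ_cons, List.mem_cons, List.mem_cons, List.idxOf_cons_ne _ (Ne.symm hvx), ih k v]
            constructor
            · rintro (h | ⟨hm, hlt⟩); · exact absurd h hvx
              exact ⟨Or.inr hm, by omega⟩
            · rintro ⟨h | hm, hlt⟩; · exact absurd h hvx
              exact Or.inr ⟨hm, by omega⟩

lemma b_fold (a : List Int) (fidx : PySem.Dict Int Int)
    (hf : ∀ v, fidx.get? v = if v ∈ a then some ((a.idxOf v : Nat) : Int) else none) :
    ∀ (l pre : List Int) (acc : List Int), a = pre ++ l →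
    ((PySem.List.enumerate l (pre.length : Int)).foldl
      (fun (res : List Int) p =>
        if p.2 ≠ 0 ∧ fidx.contains (-p.2) = true ∧ fidx.getD (-p.2) 0 < p.1 then res ++ [|p.2|]
        else res)
      acc) = acc ++ specGo pre l := by
  intro l
  induction l with
  | nil => intro pre acc _; simp [PySem.List.enumerate_nil, specGo]
  | cons n rest ih =>
      intro pre acc ha
      rw [PySem.List.enumerate_cons, List.foldl_cons]
      have hcond : (n ≠ 0 ∧ fidx.contains (-n) = true ∧ fidx.getD (-n) 0 < (pre.length : Int))
        ↔ (n ≠ 0 ∧ -n ∈ pre) := by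
        have hpre : -n ∈ pre ↔ (-n ∈ a ∧ a.idxOf (-n) < pre.length) := by
          have htake : a.take pre.length = pre := by rw [ha, List.take_left]
          have h1 := mem_take_iff_idxOf_lt a pre.length (-n)
          rw [htake] at h1
          exact h1
        constructor
        · rintro ⟨hn0, hcont, hlt⟩
          refine ⟨hn0, ?_⟩
          rw [PySem.Dict.contains_eq_isSome_get?, hf] at hcont
          by_cases hm : -n ∈ a
          · rw [hpre]
            refine ⟨hm, ?_⟩
            rw [PySem.Dict.getD_eq_get?_getD, hf, if_pos hm] at hlt
            simpa using hlt
          · simp [hm] at hcont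
        · rintro ⟨hn0, hmem⟩
          rw [hpre] at hmem
          refine ⟨hn0, ?_, ?_⟩
          · rw [PySem.Dict.contains_eq_isSome_get?, hf, if_pos hmem.1]; rfl
          · rw [PySem.Dict.getD_eq_get?_getD, hf, if_pos hmem.1]
            simpa using hmem.2
      have hstep : ((pre.length : Int) + 1) = (((pre ++ [n]).length : Nat) : Int) := by
        simp
      have ha' : a = (pre ++ [n]) ++ rest := by simpa using ha
      by_cases h : n ≠ 0 ∧ -n ∈ pre
      · rw [if_pos (hcond.mpr h), hstep, ih (pre ++ [n]) _ ha']
        simp [specGo, h]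
      · rw [if_neg (fun hh => h (hcond.mp hh)), hstep, ih (pre ++ [n]) _ ha']
        simp [specGo, h]

-- ===== VERDICT (by name: the statement is the Claim_ definition above) =====
theorem has_negatives_spec : Claim_equal_has_negatives := by
  intro a _
  unfold Spec_has_negatives has_negatives has_negatives_alt
  have hA := a_fold a [] PySem.Dict.empty [] (by intro v; simp)
  have hf : ∀ v,
      ((PySem.List.enumerate a).foldl
        (fun (d : PySem.Dict Int Int) p => if d.contains p.2 = true then d else d.insert p.2 p.1)
        PySem.Dict.empty).get? v
      = if v ∈ a then some ((a.idxOf v : Nat) : Int) else none := by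
    intro v
    rw [fidx_get a 0 PySem.Dict.empty v]
    simp [Option.orElse]
  have hB := b_fold a _ hf a [] [] (by simp)
  simp only [List.length_nil, Nat.cast_zero] at hB
  rw [hA]
  rw [hB]
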